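-- pv_equiv track=rewrite | github.com/Hadzich/data_test | task_2.py | match_multi
-- ===== SOURCE A (Python) =====
-- from typing import List, Dict, DefaultDict
--
-- def match_multi(tokens: List[str], kw_tokens: List[str]) -> bool:
--     if len(kw_tokens) == 2:
--         a, b = kw_tokens
--         for i in range(len(tokens)-1):
--             if tokens[i:i+2] in ([a,b],[b,a]):
--                 return True
--         for i in range(len(tokens)-2):
--             if (tokens[i]==a and tokens[i+2]==b) or (tokens[i]==b and tokens[i+2]==a):
--                 return True
--         return False
--     return " ".join(kw_tokens) in " ".join(tokens)
-- ===== SOURCE B (Python) =====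
-- def match_multi(tokens, kw_tokens):
--     if len(kw_tokens) != 2:
--         return " ".join(kw_tokens) in " ".join(tokens)
--     a, b = kw_tokens
--     pos_b = {i for i, t in enumerate(tokens) if t == b}
--     return any(t == a and any(p + d in pos_b for d in (-1, 1, -2, 2))
--                for p, t in enumerate(tokens))
-- ===== Notes on version B (the rewrite author's own statement) =====
-- stated objective: alternative
-- what changed: Replaces A's two sliding-window scans (adjacent-pair slices, then gap-2 index pairs) with a single position-index formulation: build the set of positions of b once, then scan positions of a and look up offsets -1,+1,-2,+2 in the set.
import Mathlib
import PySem

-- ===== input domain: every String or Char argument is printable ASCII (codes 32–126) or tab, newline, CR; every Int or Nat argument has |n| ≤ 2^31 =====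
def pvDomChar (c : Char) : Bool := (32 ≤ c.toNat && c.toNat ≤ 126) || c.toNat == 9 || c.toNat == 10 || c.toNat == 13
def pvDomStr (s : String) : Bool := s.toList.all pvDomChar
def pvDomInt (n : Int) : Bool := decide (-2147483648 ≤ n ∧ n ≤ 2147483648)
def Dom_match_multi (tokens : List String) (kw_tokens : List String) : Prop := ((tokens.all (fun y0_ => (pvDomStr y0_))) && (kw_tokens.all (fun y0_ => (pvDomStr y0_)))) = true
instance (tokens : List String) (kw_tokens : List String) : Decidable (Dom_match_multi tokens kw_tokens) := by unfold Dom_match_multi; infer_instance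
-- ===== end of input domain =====

-- B replaces A's two sliding-window scans (adjacent slices, then gap-2 pairs) by one scan over a
-- position set of b with offset lookups ±1, ±2; alternative structure, same behaviour.

-- ===== PORT A =====
def match_multi (tokens : List String) (kw_tokens : List String) : Bool :=
  match kw_tokens with
  | [a, b] =>
    ((PySem.List.pyRange 0 ((tokens.length : Int) - 1) 1).any (fun i =>
        let w := PySem.List.slice tokens (some i) (some (i + 2))
        w == [a, b] || w == [b, a]))
    ||
    ((PySem.List.pyRange 0 ((tokens.length : Int) - 2) 1).any (fun i =>
        (PySem.List.pyGetD tokens i "" == a && PySem.List.pyGetD tokens (i + 2) "" == b)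
        || (PySem.List.pyGetD tokens i "" == b && PySem.List.pyGetD tokens (i + 2) "" == a)))
  | _ => PySem.Str.isIn (PySem.Str.join " " kw_tokens) (PySem.Str.join " " tokens)

-- ===== PORT B =====
def match_multi_alt (tokens : List String) (kw_tokens : List String) : Bool :=
  if kw_tokens.length ≠ 2 then
    PySem.Str.isIn (PySem.Str.join " " kw_tokens) (PySem.Str.join " " tokens)
  else
    let a := kw_tokens.getD 0 ""
    let b := kw_tokens.getD 1 ""
    let posB : PySem.Set Int := PySem.Set.ofList
      ((PySem.List.enumerate tokens).filterMap (fun pt => if pt.2 == b then some pt.1 else none))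
    (PySem.List.enumerate tokens).any (fun pt =>
      pt.2 == a && (([-1, 1, -2, 2] : List Int).any (fun d => PySem.Set.contains posB (pt.1 + d))))

-- ===== PRECONDITION & SPEC =====
def Spec_match_multi (tokens : List String) (kw_tokens : List String) (out : Bool) : Prop := out = match_multi_alt tokens kw_tokens
instance (tokens : List String) (kw_tokens : List String) (out : Bool) : Decidable (Spec_match_multi tokens kw_tokens out) := by unfold Spec_match_multi; infer_instance

-- ===== CLAIM (what is proved, stated in full; the proofs are below) =====
def Claim_equal_match_multi : Prop := ∀ (tokens : List String) (kw_tokens : List String), Dom_match_multi tokens kw_tokens → Spec_match_multi tokens kw_tokens (match_multi tokens kw_tokens)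

-- ===== LEMMAS AND PROOFS =====

-- common formulation shared by both directions: an a-position and a b-position at distance 1 or 2
def pvKey (tokens : List String) (a b : String) : Prop :=
  ∃ p q : Nat, ∃ _ : p < tokens.length, ∃ _ : q < tokens.length,
    tokens[p] = a ∧ tokens[q] = b ∧ (q = p + 1 ∨ p = q + 1 ∨ q = p + 2 ∨ p = q + 2)

theorem take2 {α : Type} (a b : α) (t : List α) : List.take 2 (a :: b :: t) = [a, b] := rfl

theorem take_two_drop {α : Type} (l : List α) (p : Nat) (h : p + 1 < l.length) (x y : α) :
    ((l.drop p).take 2 = [x, y]) ↔ (l[p] = x ∧ l[p+1] = y) := by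
  rw [List.drop_eq_getElem_cons (by omega : p < l.length),
      List.drop_eq_getElem_cons (h := h), take2]
  simp

theorem getD_nat (tokens : List String) (j : Nat) (hj : j < tokens.length) :
    PySem.List.pyGetD tokens (j : Int) "" = tokens[j] := by
  rw [PySem.List.pyGetD_eq_getElem tokens "" (by omega) (by omega)]
  simp

theorem slice_two (tokens : List String) (j : Nat) (hj : j + 1 < tokens.length) :
    PySem.List.slice tokens (some (j : Int)) (some ((j : Int) + 2))
      = [tokens[j]'(by omega), tokens[j+1]'hj] := by
  rw [PySem.List.slice_of_nonneg tokens (by omega) (by omega) (by omega) (by omega)]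
  have h2 : ((j : Int) + 2).toNat - ((j : Int)).toNat = 2 := by omega
  have h3 : ((j : Int)).toNat = j := by omega
  rw [h2, h3, (take_two_drop tokens j hj _ _).mpr ⟨rfl, rfl⟩]

theorem A_iff_key (tokens : List String) (a b : String) :
    match_multi tokens [a, b] = true ↔ pvKey tokens a b := by
  unfold match_multi pvKey
  simp only [Bool.or_eq_true, List.any_eq_true, PySem.List.mem_pyRange_one]
  constructor
  · rintro (⟨i, ⟨hi0, hi1⟩, hw⟩ | ⟨i, ⟨hi0, hi1⟩, hw⟩)
    · have hi' : i = ((i.toNat : Nat) : Int) := by omega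
      rw [hi', slice_two tokens i.toNat (by omega)] at hw
      simp only [beq_iff_eq, List.cons.injEq, and_true] at hw
      rcases hw with ⟨h1, h2⟩ | ⟨h1, h2⟩
      · exact ⟨i.toNat, i.toNat + 1, by omega, by omega, h1, h2, Or.inl rfl⟩
      · exact ⟨i.toNat + 1, i.toNat, by omega, by omega, h2, h1, Or.inr (Or.inl rfl)⟩
    · have hi' : i = ((i.toNat : Nat) : Int) := by omega
      rw [hi'] at hw
      rw [show ((i.toNat : Int) + 2) = (((i.toNat + 2 : Nat)) : Int) by push_cast; ring] at hw
      rw [getD_nat tokens i.toNat (by omega), getD_nat tokens (i.toNat + 2) (by omega)] at hw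
      simp only [beq_iff_eq, Bool.and_eq_true] at hw
      rcases hw with ⟨h1, h2⟩ | ⟨h1, h2⟩
      · exact ⟨i.toNat, i.toNat + 2, by omega, by omega, h1, h2, Or.inr (Or.inr (Or.inl rfl))⟩
      · exact ⟨i.toNat + 2, i.toNat, by omega, by omega, h2, h1, Or.inr (Or.inr (Or.inr rfl))⟩
  · rintro ⟨p, q, hp, hq, ha, hb, h | h | h | h⟩
    · refine Or.inl ⟨(p : Int), ⟨by omega, by omega⟩, ?_⟩
      rw [slice_two tokens p (by omega)]
      subst h; simp [ha, hb]
    · refine Or.inl ⟨(q : Int), ⟨by omega, by omega⟩, ?_⟩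
      rw [slice_two tokens q (by omega)]
      subst h; simp [ha, hb]
    · refine Or.inr ⟨(p : Int), ⟨by omega, by omega⟩, ?_⟩
      rw [show ((p : Int) + 2) = (((p + 2 : Nat)) : Int) by push_cast; ring]
      rw [getD_nat tokens p (by omega), getD_nat tokens (p + 2) (by omega)]
      subst h; simp [ha, hb]
    · refine Or.inr ⟨(q : Int), ⟨by omega, by omega⟩, ?_⟩
      rw [show ((q : Int) + 2) = (((q + 2 : Nat)) : Int) by push_cast; ring]
      rw [getD_nat tokens q (by omega), getD_nat tokens (q + 2) (by omega)]
      subst h; simp [ha, hb]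

theorem B_iff_key (tokens : List String) (a b : String) :
    match_multi_alt tokens [a, b] = true ↔ pvKey tokens a b := by
  unfold match_multi_alt pvKey
  rw [if_neg (by simp)]
  simp only [show ([a, b] : List String).getD 0 "" = a from rfl,
    show ([a, b] : List String).getD 1 "" = b from rfl]
  simp only [List.any_eq_true, Bool.and_eq_true, beq_iff_eq,
    PySem.Set.contains_iff, PySem.Set.mem_ofList, List.mem_filterMap,
    PySem.List.mem_enumerate_iff]
  constructor
  · rintro ⟨pt, ⟨p, hp, rfl⟩, ha, d, hd, pt', ⟨q, hq, rfl⟩, hq'⟩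
    simp only at ha hq'
    split_ifs at hq' with hb
    · simp only [Option.some.injEq] at hq'
      fin_cases hd <;> exact ⟨p, q, hp, hq, ha, hb, by omega⟩
  · rintro ⟨p, q, hp, hq, ha, hb, hrel⟩
    have hmem : ∃ d, d ∈ ([-1, 1, -2, 2] : List Int) ∧ (p : Int) + d = (q : Int) := by
      rcases hrel with h | h | h | h
      · exact ⟨1, by simp, by omega⟩
      · exact ⟨-1, by simp, by omega⟩
      · exact ⟨2, by simp, by omega⟩
      · exact ⟨-2, by simp, by omega⟩
    obtain ⟨d, hd, hdq⟩ := hmem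
    refine ⟨((p : Int), tokens[p]), ⟨p, hp, by simp⟩, by simp [ha], d, hd, ((q : Int), tokens[q]), ⟨q, hq, by simp⟩, ?_⟩
    simp only [hb, if_true, Option.some.injEq]
    omega

theorem main_eq (tokens : List String) (a b : String) :
    match_multi tokens [a, b] = match_multi_alt tokens [a, b] := by
  rcases hA : match_multi tokens [a, b] with _ | _
  · rcases hB : match_multi_alt tokens [a, b] with _ | _
    · rfl
    · exact absurd ((A_iff_key tokens a b).mpr ((B_iff_key tokens a b).mp hB)) (by simp [hA])
  · exact ((B_iff_key tokens a b).mpr ((A_iff_key tokens a b).mp hA)).symm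

-- ===== VERDICT (by name: the statement is the Claim_ definition above) =====
theorem match_multi_spec : Claim_equal_match_multi := by
  intro tokens kw_tokens _
  unfold Spec_match_multi
  match kw_tokens with
  | [] => rfl
  | [x] => rfl
  | [a, b] => exact main_eq tokens a b
  | x :: y :: z :: rest => rfl
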